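-- pv_equiv track=rewrite | github.com/djrrb/BadgeBot | badgeBot.py | getLinesFromName
-- ===== SOURCE A (Python) =====
-- def getLinesFromName(name):
--     """
--     Split a name string into a list of lines
--     """
--     lines = name.split(' ')
--     # Process hyphens without removing them. There has to be an easier way to do this, no?
--     newLines = []
--     for line in lines:
--         if '-' in line:
--             lineElements = line.split('-')
--             for i, lineElement in enumerate(lineElements):
--                 if i != len(lineElements)-1:
--                     newLines.append(lineElement+'-')
--                 else:
--                     newLines.append(lineElement)
--         else:
--             newLines.append(line)
--     lines = newLines
--     return lines
-- ===== SOURCE B (Python) =====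
-- def getLinesFromName(name):
--     """
--     Split a name string into a list of lines
--     """
--     lines = []
--     buf = ''
--     for ch in name:
--         if ch == ' ':
--             lines.append(buf)
--             buf = ''
--         elif ch == '-':
--             lines.append(buf + '-')
--             buf = ''
--         else:
--             buf += ch
--     lines.append(buf)
--     return lines
-- ===== Notes on version B (the rewrite author's own statement) =====
-- stated objective: simpler
-- what changed: Replaced A's split-on-spaces followed by a second per-token split-on-hyphens pass (with an enumerate loop reattaching the hyphens) by a single left-to-right character scan that maintains one token buffer and emits it on space or hyphen.
import Mathlib
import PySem

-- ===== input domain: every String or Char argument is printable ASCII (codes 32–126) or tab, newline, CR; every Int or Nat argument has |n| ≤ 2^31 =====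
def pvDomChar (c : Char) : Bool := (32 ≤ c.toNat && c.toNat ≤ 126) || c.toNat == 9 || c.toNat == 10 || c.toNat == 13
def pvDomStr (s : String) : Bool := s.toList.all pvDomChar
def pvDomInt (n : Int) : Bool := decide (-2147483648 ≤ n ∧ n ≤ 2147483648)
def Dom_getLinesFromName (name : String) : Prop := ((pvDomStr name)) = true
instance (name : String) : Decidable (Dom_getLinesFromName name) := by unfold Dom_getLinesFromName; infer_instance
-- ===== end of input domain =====

-- B replaces A's split-then-resplit-on-hyphens passes by one left-to-right character
-- scan with a token buffer (objective: simpler, one pass; not claimed faster).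

-- ===== PORT A =====
def getLinesFromName (name : String) : List String :=
  let lines := (PySem.Str.split? name " ").getD []
  let newLines := lines.foldl (fun newLines line =>
    if PySem.Str.isIn "-" line then
      let lineElements := (PySem.Str.split? line "-").getD []
      (PySem.List.enumerate lineElements).foldl
        (fun nl p =>
          if p.1 ≠ (lineElements.length : Int) - 1 then nl ++ [p.2 ++ "-"]
          else nl ++ [p.2]) newLines
    else newLines ++ [line]) []
  newLines

-- ===== PORT B =====
def getLinesFromName_alt (name : String) : List String :=
  let st := name.toList.foldl (fun (st : List String × String) ch =>
    if ch = ' ' then (st.1 ++ [st.2], "")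
    else if ch = '-' then (st.1 ++ [st.2 ++ "-"], "")
    else (st.1, st.2.push ch)) ([], "")
  st.1 ++ [st.2]

-- ===== PRECONDITION & SPEC =====
def Spec_getLinesFromName (name : String) (out : List String) : Prop := out = getLinesFromName_alt name
instance (name : String) (out : List String) : Decidable (Spec_getLinesFromName name out) := by unfold Spec_getLinesFromName; infer_instance

-- ===== CLAIM (what is proved, stated in full; the proofs are below) =====
def Claim_equal_getLinesFromName : Prop := ∀ (name : String), Dom_getLinesFromName name → Spec_getLinesFromName name (getLinesFromName name)

-- ===== LEMMAS AND PROOFS =====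

/-- Reference: split a char list on a separator char (pieces keep nothing). -/
def splitRef (c : Char) : List Char → List (List Char)
  | [] => [[]]
  | a :: t => if a = c then [] :: splitRef c t else (splitRef c t).modifyHead (a :: ·)

/-- Reference for the common result: split on spaces and hyphens, hyphen kept on its piece. -/
def refLines : List Char → List (List Char)
  | [] => [[]]
  | a :: t =>
    if a = ' ' then [] :: refLines t
    else if a = '-' then ['-'] :: refLines t
    else (refLines t).modifyHead (a :: ·)

/-- Hyphen pass on a single token already split on '-': reattach '-' to all but the last piece. -/
def refHyp : List Char → List (List Char)
  | [] => [[]]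
  | a :: t => if a = '-' then ['-'] :: refHyp t else (refHyp t).modifyHead (a :: ·)

def joinHyp : List (List Char) → List (List Char)
  | [] => []
  | [p] => [p]
  | p :: q :: r => (p ++ ['-']) :: joinHyp (q :: r)

theorem splitRef_ne_nil (c : Char) (l : List Char) : splitRef c l ≠ [] := by
  cases l with
  | nil => simp [splitRef]
  | cons a t =>
    simp only [splitRef]
    split_ifs <;> simp_all [List.modifyHead_eq_nil_iff, splitRef_ne_nil c t]

theorem refHyp_ne_nil (l : List Char) : refHyp l ≠ [] := by
  cases l with
  | nil => simp [refHyp]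
  | cons a t =>
    simp only [refHyp]
    split_ifs <;> simp_all [List.modifyHead_eq_nil_iff, refHyp_ne_nil t]

theorem modifyHead_id' {α : Type} (l : List α) : List.modifyHead (fun x => x) l = l := by
  cases l <;> simp

theorem go_spec (c : Char) : ∀ (l : List Char) (fuel : Nat) (cur : List Char)
    (acc : List (List Char)), l.length < fuel →
    PySem.Chars.splitOn.go [c] fuel l cur acc
      = acc.reverse ++ (splitRef c l).modifyHead (cur.reverse ++ ·)
  | [], fuel + 1, cur, acc, _ => by
    simp [PySem.Chars.splitOn.go, splitRef]
  | a :: rest, fuel + 1, cur, acc, h => by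
    have hr : rest.length < fuel := by simpa using h
    by_cases hac : a = c
    · subst hac
      have : [a].isPrefixOf (a :: rest) = true := by simp [List.isPrefixOf]
      simp only [PySem.Chars.splitOn.go, this, if_pos, List.length_cons, List.length_nil,
        List.drop_succ_cons, List.drop_zero]
      rw [go_spec a rest fuel [] (cur.reverse :: acc) hr]
      simp [splitRef, modifyHead_id']
    · have : [c].isPrefixOf (a :: rest) = false := by
        simp [List.isPrefixOf, BEq.beq]
        intro h'; exact absurd h'.symm hac
      simp only [PySem.Chars.splitOn.go, this, Bool.false_eq_true, if_false]
      rw [go_spec c rest fuel (a :: cur) acc hr]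
      simp only [splitRef, hac, if_false, List.modifyHead_modifyHead]
      cases hsp : splitRef c rest with
      | nil => exact absurd hsp (splitRef_ne_nil c rest)
      | cons p ps => simp

theorem splitOn_eq_ref (c : Char) (l : List Char) :
    PySem.Chars.splitOn l [c] = splitRef c l := by
  show PySem.Chars.splitOn.go [c] (l.length + 1) l [] [] = _
  rw [go_spec c l (l.length + 1) [] [] (by omega)]
  simp [modifyHead_id']

theorem refHyp_of_not_mem (t : List Char) (h : '-' ∉ t) : refHyp t = [t] := by
  induction t with
  | nil => simp [refHyp]
  | cons a r ih =>
    have ha : a ≠ '-' := by intro e; exact h (e ▸ List.mem_cons_self)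
    have hr : '-' ∉ r := fun hm => h (List.mem_cons_of_mem _ hm)
    simp [refHyp, ha, ih hr]

theorem joinHyp_splitRef (t : List Char) : joinHyp (splitRef '-' t) = refHyp t := by
  induction t with
  | nil => simp [splitRef, refHyp, joinHyp]
  | cons a r ih =>
    by_cases ha : a = '-'
    · subst ha
      have hsl : splitRef '-' ('-' :: r) = [] :: splitRef '-' r := by simp [splitRef]
      have hrl : refHyp ('-' :: r) = ['-'] :: refHyp r := by simp [refHyp]
      rw [hsl, hrl, ← ih]
      cases hsp : splitRef '-' r with
      | nil => exact absurd hsp (splitRef_ne_nil _ _)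
      | cons p ps => simp [joinHyp]
    · have hsl : splitRef '-' (a :: r) = List.modifyHead (a :: ·) (splitRef '-' r) := by
        simp [splitRef, ha]
      have hrl : refHyp (a :: r) = (refHyp r).modifyHead (a :: ·) := by
        simp [refHyp, ha]
      rw [hsl, hrl, ← ih]
      cases hsp : splitRef '-' r with
      | nil => exact absurd hsp (splitRef_ne_nil _ _)
      | cons p ps =>
        cases ps with
        | nil => simp [joinHyp]
        | cons q qs => simp [joinHyp]

def joinHypS : List String → List String
  | [] => []
  | [p] => [p]
  | p :: q :: r => (p ++ "-") :: joinHypS (q :: r)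

theorem joinHypS_map (ps : List (List Char)) :
    joinHypS (ps.map String.ofList) = (joinHyp ps).map String.ofList := by
  match ps with
  | [] => simp [joinHypS, joinHyp]
  | [p] => simp [joinHypS, joinHyp]
  | p :: q :: r =>
    simp only [List.map_cons, joinHypS, joinHyp]
    rw [show String.ofList q :: r.map String.ofList = ((q :: r).map String.ofList) from by simp,
      joinHypS_map (q :: r)]
    have h1 : String.ofList p ++ "-" = String.ofList (p ++ ['-']) := by
      apply String.toList_injective; simp
    rw [h1]

theorem enumJoin (qs : List String) : ∀ (s : Int),
    (PySem.List.enumerate qs s).map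
      (fun p => if p.1 ≠ s + (qs.length : Int) - 1 then p.2 ++ "-" else p.2)
      = joinHypS qs := by
  induction qs with
  | nil => intro s; simp [PySem.List.enumerate, joinHypS]
  | cons p rest ih =>
    intro s
    rw [PySem.List.enumerate_cons]
    cases rest with
    | nil => simp [PySem.List.enumerate, joinHypS]
    | cons q r =>
      simp only [List.map_cons]
      have harg : ∀ p' : Int × String,
          (if p'.1 ≠ s + (((q :: r).length : Int) + 1) - 1 then p'.2 ++ "-" else p'.2)
            = (if p'.1 ≠ (s + 1) + ((q :: r).length : Int) - 1 then p'.2 ++ "-" else p'.2) := by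
        intro p'
        have : s + (((q :: r).length : Int) + 1) - 1 = (s + 1) + ((q :: r).length : Int) - 1 := by ring
        rw [this]
      calc ((if (s : Int) ≠ s + ((q :: r).length + 1 : Int) - 1 then p ++ "-" else p) ::
              (PySem.List.enumerate (q :: r) (s + 1)).map
                (fun p' => if p'.1 ≠ s + ((q :: r).length + 1 : Int) - 1 then p'.2 ++ "-" else p'.2))
          = (p ++ "-") :: (PySem.List.enumerate (q :: r) (s + 1)).map
                (fun p' => if p'.1 ≠ (s + 1) + ((q :: r).length : Int) - 1 then p'.2 ++ "-" else p'.2) := by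
            rw [if_pos (by simp only [List.length_cons]; push_cast; omega), List.map_congr_left (fun x _ => harg x)]
        _ = (p ++ "-") :: joinHypS (q :: r) := by rw [ih (s + 1)]
        _ = joinHypS (p :: q :: r) := by rfl

theorem flat_ref (cs : List Char) : (splitRef ' ' cs).flatMap refHyp = refLines cs := by
  induction cs with
  | nil => simp [splitRef, refLines, refHyp]
  | cons a r ih =>
    by_cases hsp : a = ' '
    · subst hsp; simp [splitRef, refLines, refHyp, ih]
    · cases hs : splitRef ' ' r with
      | nil => exact absurd hs (splitRef_ne_nil _ _)
      | cons p ps =>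
        rw [hs] at ih
        have hsl : splitRef ' ' (a :: r) = (a :: p) :: ps := by
          simp [splitRef, hsp, hs]
        by_cases hh : a = '-'
        · subst hh
          have hrl : refLines ('-' :: r) = ['-'] :: refLines r := by
            simp [refLines, hsp]
          rw [hsl, hrl, ← ih, List.flatMap_cons]
          have h2 : refHyp ('-' :: p) = ['-'] :: refHyp p := by simp [refHyp]
          rw [h2]
          simp
        · have hrl : refLines (a :: r) = (refLines r).modifyHead (a :: ·) := by
            simp [refLines, hsp, hh]
          rw [hsl, hrl, ← ih, List.flatMap_cons]
          have h2 : refHyp (a :: p) = (refHyp p).modifyHead (a :: ·) := by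
            simp [refHyp, hh]
          rw [h2]
          cases hp : refHyp p with
          | nil => exact absurd hp (refHyp_ne_nil _)
          | cons y ys => simp [hp]

theorem lineBody (nl0 : List String) (line : String) :
    (if PySem.Str.isIn "-" line then
      let lineElements := (PySem.Str.split? line "-").getD []
      (PySem.List.enumerate lineElements).foldl
        (fun nl p =>
          if p.1 ≠ (lineElements.length : Int) - 1 then nl ++ [p.2 ++ "-"]
          else nl ++ [p.2]) nl0
    else nl0 ++ [line])
      = nl0 ++ (refHyp line.toList).map String.ofList := by
  have hsplit : (PySem.Str.split? line "-").getD [] =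
      (splitRef '-' line.toList).map String.ofList := by
    show (Option.map _ (PySem.Chars.split? line.toList "-".toList)).getD [] = _
    have h1 : "-".toList = ['-'] := rfl
    rw [h1]
    simp [PySem.Chars.split?, splitOn_eq_ref]
  by_cases hin : PySem.Str.isIn "-" line = true
  · rw [if_pos hin]
    show (PySem.List.enumerate ((PySem.Str.split? line "-").getD [])).foldl _ nl0 = _
    rw [hsplit]
    have hb : (fun (nl : List String) (p : Int × String) =>
        if p.1 ≠ (((splitRef '-' line.toList).map String.ofList).length : Int) - 1
        then nl ++ [p.2 ++ "-"] else nl ++ [p.2])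
        = fun nl p => nl ++ [if p.1 ≠ (((splitRef '-' line.toList).map String.ofList).length : Int) - 1
            then p.2 ++ "-" else p.2] := by
      funext nl p; split_ifs <;> rfl
    rw [hb, PySem.List.foldl_append_singleton_eq_map]
    have := enumJoin ((splitRef '-' line.toList).map String.ofList) 0
    simp only [zero_add] at this
    rw [this, joinHypS_map, joinHyp_splitRef]
  · rw [if_neg hin]
    have hmem : '-' ∉ line.toList := by
      have : PySem.Chars.isIn ['-'] line.toList = false := by
        simpa [PySem.Str.isIn] using eq_false_of_ne_true hin
      rw [PySem.Chars.isIn_eq_false_iff] at this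
      intro hm; exact this ((List.singleton_infix_iff '-' line.toList).mpr hm)
    rw [refHyp_of_not_mem _ hmem]
    simp

theorem A_char (name : String) :
    getLinesFromName name = (refLines name.toList).map String.ofList := by
  unfold getLinesFromName
  have hsplit : PySem.Str.split? name " " =
      some ((splitRef ' ' name.toList).map String.ofList) := by
    show Option.map _ (PySem.Chars.split? name.toList " ".toList) = _
    have h1 : " ".toList = [' '] := rfl
    rw [h1]
    simp [PySem.Chars.split?, splitOn_eq_ref]
  rw [hsplit]
  simp only [Option.getD_some]
  have hbody : (fun (newLines : List String) (line : String) =>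
      if PySem.Str.isIn "-" line then
        let lineElements := (PySem.Str.split? line "-").getD []
        (PySem.List.enumerate lineElements).foldl
          (fun nl p =>
            if p.1 ≠ (lineElements.length : Int) - 1 then nl ++ [p.2 ++ "-"]
            else nl ++ [p.2]) newLines
      else newLines ++ [line])
      = fun newLines line => newLines ++ (refHyp line.toList).map String.ofList := by
    funext nl line; exact lineBody nl line
  rw [hbody, PySem.List.foldl_append_eq_flatMap]
  rw [List.flatMap_map]
  simp only [String.toList_ofList, List.nil_append]
  rw [← flat_ref name.toList]
  rw [List.map_flatMap]

/-- The loop body of B's scan (identical to the lambda in the port). -/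
def bStep : List String × String → Char → List String × String := fun st ch =>
  if ch = ' ' then (st.1 ++ [st.2], "")
  else if ch = '-' then (st.1 ++ [st.2 ++ "-"], "")
  else (st.1, st.2.push ch)

theorem B_char (cs : List Char) : ∀ (lines : List String) (buf : String),
    (cs.foldl bStep (lines, buf)).1 ++ [(cs.foldl bStep (lines, buf)).2]
      = lines ++ ((refLines cs).modifyHead (fun h => buf.toList ++ h)).map String.ofList := by
  induction cs with
  | nil =>
    intro lines buf
    simp only [List.foldl_nil, refLines, List.modifyHead, List.map]
    have : String.ofList (buf.toList ++ []) = buf := by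
      apply String.toList_injective; simp
    rw [this]
  | cons a r ih =>
    intro lines buf
    by_cases hsp : a = ' '
    · subst hsp
      have hstep : bStep (lines, buf) ' ' = (lines ++ [buf], "") := by simp [bStep]
      rw [List.foldl_cons, hstep, ih (lines ++ [buf]) ""]
      have h0 : (refLines r).modifyHead (fun h => "".toList ++ h) = refLines r := by
        simp [modifyHead_id']
      have hrl : refLines (' ' :: r) = [] :: refLines r := by simp [refLines]
      rw [h0, hrl]
      simp only [List.modifyHead, List.map_cons]
      have : String.ofList (buf.toList ++ []) = buf := by
        apply String.toList_injective; simp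
      rw [this, List.append_assoc]
      rfl
    · by_cases hh : a = '-'
      · subst hh
        have hstep : bStep (lines, buf) '-' = (lines ++ [buf ++ "-"], "") := by
          simp [bStep]
        rw [List.foldl_cons, hstep, ih (lines ++ [buf ++ "-"]) ""]
        have h0 : (refLines r).modifyHead (fun h => "".toList ++ h) = refLines r := by
          simp [modifyHead_id']
        have hrl : refLines ('-' :: r) = ['-'] :: refLines r := by simp [refLines]
        rw [h0, hrl]
        simp only [List.modifyHead, List.map_cons]
        have : String.ofList (buf.toList ++ ['-']) = buf ++ "-" := by
          apply String.toList_injective; simp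
        rw [this, List.append_assoc]
        rfl
      · have hstep : bStep (lines, buf) a = (lines, buf.push a) := by
          simp [bStep, hsp, hh]
        rw [List.foldl_cons, hstep, ih lines (buf.push a)]
        have hrl : refLines (a :: r) = (refLines r).modifyHead (a :: ·) := by
          simp [refLines, hsp, hh]
        rw [hrl, List.modifyHead_modifyHead]
        have harg : (fun h => (buf.push a).toList ++ h)
            = (fun h => buf.toList ++ h) ∘ (a :: ·) := by
          funext h; simp [String.toList_push]
        rw [harg]

theorem B_char_top (name : String) :
    getLinesFromName_alt name = (refLines name.toList).map String.ofList := by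
  show (name.toList.foldl bStep ([], "")).1 ++ [(name.toList.foldl bStep ([], "")).2] = _
  rw [B_char name.toList [] ""]
  have h0 : (refLines name.toList).modifyHead (fun h => "".toList ++ h)
      = refLines name.toList := by simp [modifyHead_id']
  rw [h0, List.nil_append]

-- ===== VERDICT (by name: the statement is the Claim_ definition above) =====
theorem getLinesFromName_spec : Claim_equal_getLinesFromName := by
  intro name _
  show getLinesFromName name = getLinesFromName_alt name
  rw [A_char, B_char_top]
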